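-- pv_equiv track=rewrite | github.com/TUCN1022/COMP9021 | 9021/ASS1/1_superpower.py | fourth_question
-- ===== SOURCE A (Python) =====
-- def fourth_question(input_list):
--     deal_list=[0]
--     for i in range(len(input_list)):
--         if deal_list[i]>=0:
--             if input_list[i]>=0:
--                 deal_list.append(0)
--             else:
--                 deal_list.append(input_list[i])
--         else:
--             deal_list.append(input_list[i]+deal_list[-1])
--     return sum(input_list)-2*min(deal_list)
-- ===== SOURCE B (Python) =====
-- def fourth_question(input_list):
--     p = 0       # running prefix sum
--     M = 0       # maximum prefix sum seen so far (including the empty prefix)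
--     best = 0    # minimum contiguous-subarray sum (empty subarray allowed)
--     for x in input_list:
--         p += x
--         if p - M < best:
--             best = p - M
--         if p > M:
--             M = p
--     return p - 2 * best
-- ===== Notes on version B (the rewrite author's own statement) =====
-- stated objective: alternative
-- what changed: A builds an auxiliary deal_list of running minimum-ending-here values and then scans it with min(); B recognises the result as sum minus twice the minimum contiguous-subarray sum and computes it in one prefix-sum pass keeping only three scalars (prefix sum, max prefix, best), eliminating the auxiliary list, its indexed accesses and the second min() scan.
import Mathlib
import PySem

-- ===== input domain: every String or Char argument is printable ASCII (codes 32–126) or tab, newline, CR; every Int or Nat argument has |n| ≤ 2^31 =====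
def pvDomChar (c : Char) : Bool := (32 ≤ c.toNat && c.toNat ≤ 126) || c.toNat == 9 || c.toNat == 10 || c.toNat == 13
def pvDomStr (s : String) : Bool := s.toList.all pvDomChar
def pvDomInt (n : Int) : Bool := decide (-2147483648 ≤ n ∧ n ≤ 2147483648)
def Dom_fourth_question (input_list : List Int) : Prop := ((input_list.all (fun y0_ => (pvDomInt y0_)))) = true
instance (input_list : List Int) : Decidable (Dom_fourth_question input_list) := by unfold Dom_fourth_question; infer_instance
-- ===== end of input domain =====

-- B keeps only O(1) state (prefix sum, running max prefix, best) instead of A's auxiliary list + min scan.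

-- ===== PORT A =====
-- one loop iteration of A: deal_list.append(...) driven by deal_list[i], input_list[i], deal_list[-1]
def stepA (input_list : List Int) (deal : List Int) (i : Int) : List Int :=
  if PySem.List.pyGetD deal i 0 ≥ 0 then
    if PySem.List.pyGetD input_list i 0 ≥ 0 then deal ++ [0]
    else deal ++ [PySem.List.pyGetD input_list i 0]
  else deal ++ [PySem.List.pyGetD input_list i 0 + PySem.List.pyGetD deal (-1) 0]

def fourth_question (input_list : List Int) : Int :=
  let deal := (PySem.List.pyRange 0 input_list.length 1).foldl (stepA input_list) [0]
  input_list.sum - 2 * ((PySem.List.min? deal (fun y => y)).getD 0)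

-- ===== PORT B =====
def stepB (s : Int × Int × Int) (x : Int) : Int × Int × Int :=
  let p := s.1 + x
  let best := if p - s.2.1 < s.2.2 then p - s.2.1 else s.2.2
  let M := if p > s.2.1 then p else s.2.1
  (p, M, best)

def fourth_question_alt (input_list : List Int) : Int :=
  let s := input_list.foldl stepB (0, 0, 0)
  s.1 - 2 * s.2.2

-- ===== PRECONDITION & SPEC =====
def Spec_fourth_question (input_list : List Int) (out : Int) : Prop := out = fourth_question_alt input_list
instance (input_list : List Int) (out : Int) : Decidable (Spec_fourth_question input_list out) := by unfold Spec_fourth_question; infer_instance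

-- ===== CLAIM (what is proved, stated in full; the proofs are below) =====
def Claim_equal_fourth_question : Prop := ∀ (input_list : List Int), Dom_fourth_question input_list → Spec_fourth_question input_list (fourth_question input_list)

-- ===== LEMMAS AND PROOFS =====

-- the values A appends to deal_list, as a structural recursion over the input with the running last value
def dealGo (xs : List Int) (cur : Int) : List Int :=
  match xs with
  | [] => []
  | x :: rest =>
    let cur' := if cur ≥ 0 then (if x ≥ 0 then 0 else x) else x + cur
    cur' :: dealGo rest cur'

-- A's indexed fold over range(len) builds deal ++ dealGo rest (last deal)
theorem foldA_eq (rest : List Int) : ∀ (pre deal : List Int) (hne : deal ≠ []),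
    deal.length = pre.length + 1 →
    (PySem.List.pyRange pre.length (pre ++ rest).length 1).foldl (stepA (pre ++ rest)) deal
      = deal ++ dealGo rest (deal.getLast hne) := by
  induction rest with
  | nil =>
    intro pre deal hne hlen
    have hz : PySem.List.pyRange (pre.length : Int) ((pre ++ ([] : List Int)).length : Int) 1 = [] := by
      apply List.eq_nil_of_length_eq_zero
      rw [PySem.List.length_pyRange_one]
      simp
    rw [hz]
    simp [dealGo]
  | cons x rs ih =>
    intro pre deal hne hlen
    have hlt : (pre.length : Int) < ((pre ++ x :: rs).length : Int) := by simp
    rw [PySem.List.pyRange_one_cons hlt, List.foldl_cons]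
    have h1 : PySem.List.pyGetD deal ((pre.length : Nat) : Int) 0 = deal.getLast hne := by
      rw [PySem.List.pyGetD_eq_getElem _ _ (by positivity) (by simp; omega)]
      rw [List.getLast_eq_getElem]
      congr 1
      simp; omega
    have h2 : PySem.List.pyGetD (pre ++ x :: rs) ((pre.length : Nat) : Int) 0 = x := by
      rw [PySem.List.pyGetD_eq_getElem _ _ (by positivity) (by simp)]
      simp
    have h3 : PySem.List.pyGetD deal (-1) 0 = deal.getLast hne :=
      PySem.List.pyGetD_neg_one deal 0 hne
    have hstep : stepA (pre ++ x :: rs) deal (pre.length : Int)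
        = deal ++ [if deal.getLast hne ≥ 0 then (if x ≥ 0 then 0 else x)
                   else x + deal.getLast hne] := by
      unfold stepA
      rw [h1, h2, h3]
      split_ifs <;> rfl
    rw [hstep]
    -- re-index: pre.length + 1 = (pre ++ [x]).length, pre ++ x :: rs = (pre ++ [x]) ++ rs
    have hre : pre ++ x :: rs = (pre ++ [x]) ++ rs := by simp
    have hcast : ((pre.length : Nat) : Int) + 1 = (((pre ++ [x]).length : Nat) : Int) := by
      simp
    set cur' := if deal.getLast hne ≥ 0 then (if x ≥ 0 then 0 else x)
                else x + deal.getLast hne with hcur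
    have hne' : deal ++ [cur'] ≠ [] := by simp
    have hlen' : (deal ++ [cur']).length = (pre ++ [x]).length + 1 := by
      simp [hlen]
    have hlast' : (deal ++ [cur']).getLast hne' = cur' := by
      simp
    have := ih (pre ++ [x]) (deal ++ [cur']) hne' hlen'
    rw [hlast'] at this
    rw [hre, hcast, this]
    simp [dealGo, hcur]

theorem min_id_foldl (l : List Int) (a : Int) :
    (PySem.List.min? (a :: l) (fun y => y)).getD 0 = l.foldl min a := by
  rw [PySem.List.min?_id_cons]; rfl

-- the loop invariant tying A's (cur, running min) to B's (p, M, best)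
theorem invariant (xs : List Int) : ∀ (cur m p M best : Int),
    m = best → m ≤ 0 → ((cur < 0 ∧ cur = p - M) ∨ (0 ≤ cur ∧ p = M)) →
    (dealGo xs cur).foldl min m = (xs.foldl stepB (p, M, best)).2.2
      ∧ (xs.foldl stepB (p, M, best)).1 = p + xs.sum := by
  induction xs with
  | nil =>
    intro cur m p M best h1 h2 h3
    simp [dealGo, h1]
  | cons x rest ih =>
    intro cur m p M best h1 h2 h3
    simp only [dealGo, List.foldl_cons, List.sum_cons, stepB]
    have key := ih (if cur ≥ 0 then (if x ≥ 0 then 0 else x) else x + cur)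
        (min m (if cur ≥ 0 then (if x ≥ 0 then 0 else x) else x + cur))
        (p + x)
        (if p + x > M then p + x else M)
        (if p + x - M < best then p + x - M else best)
        (by rw [min_def]; split_ifs <;> omega)
        (by rw [min_def]; split_ifs <;> omega)
        (by split_ifs <;> omega)
    exact ⟨key.1, by rw [key.2]; ring⟩

-- ===== VERDICT (by name: the statement is the Claim_ definition above) =====
theorem fourth_question_spec : Claim_equal_fourth_question := by
  intro xs _
  unfold Spec_fourth_question fourth_question fourth_question_alt
  have h := foldA_eq xs [] [0] (by simp) (by simp)
  simp only [List.nil_append, List.length_nil, Nat.cast_zero] at h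
  rw [h]
  have hg : ([0] : List Int).getLast (by simp) = 0 := by simp
  rw [hg]
  simp only [List.cons_append, List.nil_append] at *
  rw [min_id_foldl]
  have hinv := invariant xs 0 0 0 0 0 rfl le_rfl (Or.inr ⟨le_rfl, rfl⟩)
  rw [hinv.1]
  have := hinv.2
  omega
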